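-- pv_equiv track=rewrite | github.com/meenu-gupta/huma-server-sdk | extensions/export_deployment/helpers/convertion_helpers.py | convert_flat_dict_to_csv_format
-- ===== SOURCE A (Python) =====
-- from typing import Union, Any
--
-- def convert_flat_dict_to_csv_format(
--     res_data: Union[list, dict[str, list]]
-- ) -> list[list]:
--     if type(res_data) is list:
--         res_data = {"data": res_data}
--
--     keys = []
--     for key, data in res_data.items():
--         # get all keys in json objects
--         for i in range(0, len(data)):
--             for j in data[i]:
--                 if j not in keys:
--                     keys.append(j)
--
--     # map data in each row to key index
--     converted = [keys]
--     for key, data in res_data.items():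
--         for i in range(0, len(data)):
--             row = []
--             for j in range(0, len(keys)):
--                 if keys[j] in data[i]:
--                     row.append(f"{data[i][keys[j]]}")
--                 else:
--                     row.append(None)
--             converted.append(row)
--
--     return converted
-- ===== SOURCE B (Python) =====
-- def convert_flat_dict_to_csv_format(res_data):
--     if type(res_data) is list:
--         res_data = {"data": res_data}
--     # single pass: build sparse columns keyed by field, padding lazily with None
--     cols = {}
--     n = 0
--     for data in res_data.values():
--         for rec in data:
--             for k, v in rec.items():
--                 col = cols.get(k)
--                 if col is None:
--                     col = cols[k] = []
--                 col.extend([None] * (n - len(col)))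
--                 col.append(f"{v}")
--             n += 1
--     for col in cols.values():
--         col.extend([None] * (n - len(col)))
--     keys = list(cols)
--     return [keys] + [[cols[k][i] for k in keys] for i in range(n)]
-- ===== Notes on version B (the rewrite author's own statement) =====
-- stated objective: alternative
-- what changed: B replaces A's two staged passes (list-membership key union, then a per-row scan over every key with a membership test) by one column-oriented pass: a single sweep over the records fills sparse per-key column lists with lazy None padding while counting rows, and the table is produced by padding the columns and transposing them.
import Mathlib
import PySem

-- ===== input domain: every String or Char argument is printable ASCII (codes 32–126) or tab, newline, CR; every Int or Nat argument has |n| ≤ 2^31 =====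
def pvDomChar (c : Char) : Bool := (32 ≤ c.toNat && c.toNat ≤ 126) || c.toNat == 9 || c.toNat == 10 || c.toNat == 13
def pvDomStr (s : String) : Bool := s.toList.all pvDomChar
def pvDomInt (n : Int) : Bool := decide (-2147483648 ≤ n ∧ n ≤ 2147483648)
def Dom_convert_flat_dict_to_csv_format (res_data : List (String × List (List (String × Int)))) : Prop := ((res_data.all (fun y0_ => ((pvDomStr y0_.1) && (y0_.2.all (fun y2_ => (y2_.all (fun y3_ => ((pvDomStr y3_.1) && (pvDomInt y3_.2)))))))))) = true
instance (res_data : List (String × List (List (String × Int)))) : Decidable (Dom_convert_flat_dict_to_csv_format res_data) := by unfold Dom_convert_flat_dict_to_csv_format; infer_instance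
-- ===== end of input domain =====

-- B is a single-pass column-oriented rebuild: one sweep over the records fills sparse per-key
-- columns (padding lazily with None) while counting rows, and the table is emitted by transposing
-- the padded columns; A instead makes a separate key-union pass and then scans every key per row.
-- Objective: alternative decomposition (same cost; no speed claim).

-- ===== PORT A =====
def convert_flat_dict_to_csv_format (res_data : List (String × List (List (String × Int)))) : List (List (Option String)) :=
  let d : PySem.Dict String (List (PySem.Dict String Int)) :=
    PySem.Dict.ofList (res_data.map (fun p => (p.1, p.2.map PySem.Dict.ofList)))
  let keys : List String :=
    d.items.foldl (fun keys kd =>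
      kd.2.foldl (fun keys rec =>
        rec.keys.foldl (fun keys j => if j ∈ keys then keys else keys ++ [j]) keys) keys) []
  let converted : List (List (Option String)) :=
    d.items.foldl (fun conv kd =>
      kd.2.foldl (fun conv rec =>
        conv ++ [keys.foldl (fun row k =>
          row ++ [if rec.contains k then some (PySem.Int.toStr (rec.getD k 0)) else none]) []]) conv)
      [keys.map some]
  converted

-- ===== PORT B =====
def convert_flat_dict_to_csv_format_alt (res_data : List (String × List (List (String × Int)))) : List (List (Option String)) :=
  let d : PySem.Dict String (List (PySem.Dict String Int)) :=
    PySem.Dict.ofList (res_data.map (fun p => (p.1, p.2.map PySem.Dict.ofList)))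
  -- single pass over all records: sparse columns dict + row counter n (n is never negative, so Nat is exact)
  let st : PySem.Dict String (List (Option String)) × Nat :=
    d.values.foldl (fun st data =>
      data.foldl (fun st rec =>
        (rec.items.foldl (fun cols kv =>
            let col := cols.getD kv.1 []
            cols.insert kv.1 (col ++ List.replicate (st.2 - col.length) none ++ [some (PySem.Int.toStr kv.2)]))
          st.1, st.2 + 1)) st)
      (PySem.Dict.empty, 0)
  -- pad every column to length n (Python extends the lists in place; insert overwrites in place)
  let cols := st.1.items.foldl (fun c p => c.insert p.1 (p.2 ++ List.replicate (st.2 - p.2.length) none)) st.1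
  let keys := cols.keys
  -- cols[k][i] is always in range after padding, so the '.getD none' default is never used
  [keys.map some] ++ (List.range st.2).map (fun i => keys.map (fun k => (cols.getD k [])[i]?.getD none))

-- ===== PRECONDITION & SPEC =====
def Spec_convert_flat_dict_to_csv_format (res_data : List (String × List (List (String × Int)))) (out : List (List (Option String))) : Prop := out = convert_flat_dict_to_csv_format_alt res_data
instance (res_data : List (String × List (List (String × Int)))) (out : List (List (Option String))) : Decidable (Spec_convert_flat_dict_to_csv_format res_data out) := by unfold Spec_convert_flat_dict_to_csv_format; infer_instance

-- ===== CLAIM (what is proved, stated in full; the proofs are below) =====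
def Claim_equal_convert_flat_dict_to_csv_format : Prop := ∀ (res_data : List (String × List (List (String × Int)))), Dom_convert_flat_dict_to_csv_format res_data → Spec_convert_flat_dict_to_csv_format res_data (convert_flat_dict_to_csv_format res_data)

-- ===== LEMMAS AND PROOFS =====

-- what A writes in the cell for record `rec`, key `k`
def pvCell (rec : PySem.Dict String Int) (k : String) : Option String :=
  if rec.contains k then some (PySem.Int.toStr (rec.getD k 0)) else none

-- ordered union of the keys of a record prefix
def pvKeyU (hist : List (PySem.Dict String Int)) : List String :=
  hist.foldl (fun ks rec => PySem.Set.update ks rec.keys) []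

-- a nested 'for' loop is a fold over the flattened list
theorem pv_foldl_flatMap {α β γ : Type} (l : List α) (h : α → List β) (g : γ → β → γ) (init : γ) :
    (l.flatMap h).foldl g init = l.foldl (fun acc x => (h x).foldl g acc) init := by
  induction l generalizing init with
  | nil => rfl
  | cons a t ih => simp [List.foldl_append, ih]

-- … and a nested loop over a plain list of lists
theorem pv_foldl_join {α γ : Type} (l : List (List α)) (g : γ → α → γ) (init : γ) :
    l.foldl (fun acc x => x.foldl g acc) init = (l.flatMap id).foldl g init := by
  induction l generalizing init with
  | nil => rfl
  | cons a t ih => simp [List.foldl_append, ih]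

-- an insert-loop over pairs with distinct keys: lookups of untouched keys are unchanged …
theorem pv_ins_miss {α : Type} (pairs : List (String × α))
    (f : String × α → List (Option String) → List (Option String))
    (d : PySem.Dict String (List (Option String))) (k : String)
    (h : ∀ kv ∈ pairs, kv.1 ≠ k) :
    (pairs.foldl (fun c p => c.insert p.1 (f p (c.getD p.1 []))) d).getD k [] = d.getD k [] := by
  induction pairs generalizing d with
  | nil => rfl
  | cons p t ih =>
    simp only [List.foldl_cons]
    rw [ih _ (fun kv hk => h kv (List.mem_cons_of_mem _ hk)),
        PySem.Dict.getD_insert_of_ne _ _ _ (Ne.symm (h p List.mem_cons_self))]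

-- … and each listed key ends up holding f applied to its ORIGINAL column
theorem pv_ins_hit {α : Type} (pairs : List (String × α))
    (f : String × α → List (Option String) → List (Option String))
    (d : PySem.Dict String (List (Option String)))
    (hnd : (pairs.map Prod.fst).Nodup) :
    ∀ kv ∈ pairs, (pairs.foldl (fun c p => c.insert p.1 (f p (c.getD p.1 []))) d).getD kv.1 [] = f kv (d.getD kv.1 []) := by
  induction pairs generalizing d with
  | nil => intro kv h; cases h
  | cons p t ih =>
    simp only [List.map_cons, List.nodup_cons] at hnd
    intro kv hkv
    rcases List.mem_cons.1 hkv with h | h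
    · subst h
      simp only [List.foldl_cons]
      rw [pv_ins_miss t f _ kv.1 (fun kv' hk' he => hnd.1 (he ▸ List.mem_map_of_mem hk')),
          PySem.Dict.getD_insert_self]
    · simp only [List.foldl_cons]
      have hne : kv.1 ≠ p.1 := fun he => hnd.1 (he ▸ List.mem_map_of_mem h)
      rw [ih _ hnd.2 kv h, PySem.Dict.getD_insert_of_ne _ _ _ hne]

-- values of Dict.ofList come from the input list (to recover Nodup of record keys)
theorem pv_values_foldl_insert {κ ν : Type} [BEq κ] [LawfulBEq κ]
    (l : List (κ × ν)) (d : PySem.Dict κ ν) :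
    ∀ w ∈ (l.foldl (fun acc p => acc.insert p.1 p.2) d).values, w ∈ d.values ∨ ∃ p ∈ l, w = p.2 := by
  induction l generalizing d with
  | nil => intro w hw; exact Or.inl hw
  | cons p t ih =>
    intro w hw
    rcases ih _ w hw with h | h
    · rcases PySem.Dict.mem_values_insert d p.1 p.2 w h with h | h
      · exact Or.inr ⟨p, List.mem_cons_self, h⟩
      · exact Or.inl h
    · obtain ⟨q, hq, hw⟩ := h
      exact Or.inr ⟨q, List.mem_cons_of_mem _ hq, hw⟩

theorem pv_values_ofList {κ ν : Type} [BEq κ] [LawfulBEq κ] (l : List (κ × ν)) :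
    ∀ w ∈ (PySem.Dict.ofList l).values, ∃ p ∈ l, w = p.2 := by
  intro w hw
  rcases pv_values_foldl_insert l PySem.Dict.empty w hw with h | h
  · simp [PySem.Dict.values, PySem.Dict.empty] at h
  · exact h

-- the column invariant after processing `hist`
def pvInv (hist : List (PySem.Dict String Int)) (cols : PySem.Dict String (List (Option String))) : Prop :=
  cols.keys = pvKeyU hist ∧ cols.keys.Nodup ∧
  ∀ k, (cols.getD k []).length ≤ hist.length ∧
    cols.getD k [] ++ List.replicate (hist.length - (cols.getD k []).length) none
      = hist.map (fun r => pvCell r k)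

theorem pv_inv_nil : pvInv [] PySem.Dict.empty := by
  refine ⟨rfl, List.nodup_nil, fun k => ?_⟩
  simp [PySem.Dict.getD_empty]

-- processing ONE record preserves the invariant
theorem pv_step (hist : List (PySem.Dict String Int)) (cols : PySem.Dict String (List (Option String)))
    (rec : PySem.Dict String Int) (hrnd : rec.keys.Nodup) (hinv : pvInv hist cols) :
    pvInv (hist ++ [rec])
      (rec.items.foldl (fun cols kv =>
          cols.insert kv.1 (cols.getD kv.1 [] ++ List.replicate (hist.length - (cols.getD kv.1 []).length) none ++ [some (PySem.Int.toStr kv.2)]))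
        cols) := by
  obtain ⟨hkeys, hknd, hcol⟩ := hinv
  have hfst : rec.items.map Prod.fst = rec.keys := rfl
  have hshape : (fun (cols : PySem.Dict String (List (Option String))) (kv : String × Int) =>
        cols.insert kv.1 (cols.getD kv.1 [] ++ List.replicate (hist.length - (cols.getD kv.1 []).length) none ++ [some (PySem.Int.toStr kv.2)]))
      = fun c p => c.insert p.1 ((fun (kv : String × Int) (col : List (Option String)) =>
          col ++ List.replicate (hist.length - col.length) none ++ [some (PySem.Int.toStr kv.2)]) p (c.getD p.1 [])) := rfl
  refine ⟨?_, ?_, ?_⟩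
  · -- keys
    rw [hshape, PySem.Dict.keys_foldl_insert_key, hfst, hkeys]
    simp [pvKeyU, List.foldl_append]
  · exact PySem.Dict.nodup_keys_foldl_insert_key _ _ _ _ hknd
  · intro k
    by_cases hk : k ∈ rec.keys
    · -- the record has key k: the loop appends the padded cell
      obtain ⟨kv, hkv, hkv1⟩ := List.mem_map.1 (hfst ▸ hk)
      have hexp : (rec.items.foldl (fun cols kv =>
            cols.insert kv.1 (cols.getD kv.1 [] ++ List.replicate (hist.length - (cols.getD kv.1 []).length) none ++ [some (PySem.Int.toStr kv.2)]))
          cols).getD k []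
          = cols.getD k [] ++ List.replicate (hist.length - (cols.getD k []).length) none
              ++ [some (PySem.Int.toStr kv.2)] := by
        have hthis := pv_ins_hit rec.items
          (fun (kv : String × Int) (col : List (Option String)) =>
            col ++ List.replicate (hist.length - col.length) none ++ [some (PySem.Int.toStr kv.2)])
          cols (hfst ▸ hrnd) kv hkv
        rw [hkv1] at hthis
        rw [hshape]
        exact hthis
      rw [hexp]
      have hlen := (hcol k).1
      have hpad := (hcol k).2
      have hcell : pvCell rec k = some (PySem.Int.toStr kv.2) := by
        have hc : rec.contains k := (PySem.Dict.contains_iff_mem_keys rec k).2 hk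
        have hg : rec.getD k 0 = kv.2 := by
          have hm : (k, kv.2) ∈ rec.items := by
            have : kv = (k, kv.2) := by cases kv; cases hkv1; rfl
            exact this ▸ hkv
          exact PySem.Dict.getD_of_mem_items rec hm hrnd 0
        simp [pvCell, hc, hg]
      constructor
      · simp; omega
      · have hz : (hist ++ [rec]).length
            - (cols.getD k [] ++ List.replicate (hist.length - (cols.getD k []).length) none
                ++ [some (PySem.Int.toStr kv.2)]).length = 0 := by simp; omega
        rw [hz, List.replicate_zero, List.append_nil, hpad]
        simp [hcell]
    · -- the record lacks key k: the column is untouched and the pad grows by one None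
      have hne : ∀ kv ∈ rec.items, kv.1 ≠ k := by
        intro kv hkv he
        exact hk (he ▸ (hfst ▸ List.mem_map_of_mem hkv))
      have hexp : (rec.items.foldl (fun cols kv =>
            cols.insert kv.1 (cols.getD kv.1 [] ++ List.replicate (hist.length - (cols.getD kv.1 []).length) none ++ [some (PySem.Int.toStr kv.2)]))
          cols).getD k [] = cols.getD k [] := by
        rw [hshape]
        exact pv_ins_miss rec.items
          (fun (kv : String × Int) (col : List (Option String)) =>
            col ++ List.replicate (hist.length - col.length) none ++ [some (PySem.Int.toStr kv.2)])
          cols k hne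
      rw [hexp]
      have hlen := (hcol k).1
      have hpad := (hcol k).2
      have hcell : pvCell rec k = none := by
        have hc : rec.contains k = false := by
          by_contra hcc
          exact hk ((PySem.Dict.contains_iff_mem_keys rec k).1 (by simpa using hcc))
        simp [pvCell, hc]
      constructor
      · simp; omega
      · have h1 : (hist ++ [rec]).length - (cols.getD k []).length
            = (hist.length - (cols.getD k []).length) + 1 := by simp; omega
        rw [h1, List.replicate_succ', ← List.append_assoc, hpad]
        simp [hcell]

-- the whole single pass establishes the invariant for all records, with the counter = #records
theorem pv_loop (rs : List (PySem.Dict String Int)) :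
    ∀ (hist : List (PySem.Dict String Int)) (cols : PySem.Dict String (List (Option String))),
    (∀ r ∈ rs, r.keys.Nodup) → pvInv hist cols →
    pvInv (hist ++ rs)
      (rs.foldl (fun st rec =>
        (rec.items.foldl (fun cols kv =>
            cols.insert kv.1 (cols.getD kv.1 [] ++ List.replicate (st.2 - (cols.getD kv.1 []).length) none ++ [some (PySem.Int.toStr kv.2)]))
          st.1, st.2 + 1)) (cols, hist.length)).1 ∧
    (rs.foldl (fun st rec =>
        (rec.items.foldl (fun cols kv =>
            cols.insert kv.1 (cols.getD kv.1 [] ++ List.replicate (st.2 - (cols.getD kv.1 []).length) none ++ [some (PySem.Int.toStr kv.2)]))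
          st.1, st.2 + 1)) (cols, hist.length)).2 = (hist ++ rs).length := by
  induction rs with
  | nil => intro hist cols _ hinv; exact ⟨by simpa using hinv, by simp⟩
  | cons r t ih =>
    intro hist cols hnd hinv
    simp only [List.foldl_cons]
    have hstep := pv_step hist cols r (hnd r List.mem_cons_self) hinv
    have hrec := ih (hist ++ [r]) _ (fun r' h => hnd r' (List.mem_cons_of_mem _ h)) hstep
    simpa [List.append_assoc] using hrec

-- ===== VERDICT (by name: the statement is the Claim_ definition above) =====
theorem convert_flat_dict_to_csv_format_spec : Claim_equal_convert_flat_dict_to_csv_format := by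
  intro res_data _
  unfold Spec_convert_flat_dict_to_csv_format
  simp only [convert_flat_dict_to_csv_format, convert_flat_dict_to_csv_format_alt]
  set d : PySem.Dict String (List (PySem.Dict String Int)) :=
    PySem.Dict.ofList (res_data.map (fun p => (p.1, p.2.map PySem.Dict.ofList))) with hd
  set records : List (PySem.Dict String Int) := d.items.flatMap (fun kd => kd.2) with hrecords
  -- every record's keys are Nodup (records are Dict.ofList values)
  have hrecnd : ∀ rec ∈ records, rec.keys.Nodup := by
    intro rec hrec
    obtain ⟨kd, hkd, hreckd⟩ := List.mem_flatMap.1 hrec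
    have hv : kd.2 ∈ d.values := by
      simp only [PySem.Dict.values]; exact List.mem_map.2 ⟨kd, hkd, rfl⟩
    obtain ⟨p, hpL, hp⟩ := pv_values_ofList _ _ hv
    obtain ⟨x, _, hx⟩ := List.mem_map.1 hpL
    rw [hp, ← hx] at hreckd
    obtain ⟨ll, _, hll⟩ := List.mem_map.1 hreckd
    rw [← hll]
    exact PySem.Dict.nodup_keys_ofList ll
  have hvals : d.values.flatMap id = records := by
    simp only [PySem.Dict.values, hrecords, List.flatMap_map]
    rfl
  -- ===== A-side normal form =====
  have hKA :
      d.items.foldl (fun keys kd =>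
        kd.2.foldl (fun keys rec =>
          rec.keys.foldl (fun keys j => if j ∈ keys then keys else keys ++ [j]) keys) keys) []
      = pvKeyU records := by
    rw [← pv_foldl_flatMap d.items (fun kd => kd.2)
          (fun ks rec => rec.keys.foldl (fun keys j => if j ∈ keys then keys else keys ++ [j]) ks) []]
    have hfun : (fun (ks : List String) (rec : PySem.Dict String Int) =>
          rec.keys.foldl (fun keys j => if j ∈ keys then keys else keys ++ [j]) ks)
        = fun ks rec => PySem.Set.update ks rec.keys := by
      funext ks rec
      simp only [PySem.Set.update]
      congr 1
      funext s x
      exact (PySem.Set.add_eq_ite s x).symm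
    rw [hfun, ← hrecords]
    rfl
  have hA :
      d.items.foldl (fun conv kd =>
        kd.2.foldl (fun conv rec =>
          conv ++ [(pvKeyU records).foldl (fun row k =>
            row ++ [if rec.contains k then some (PySem.Int.toStr (rec.getD k 0)) else none]) []]) conv)
        [(pvKeyU records).map some]
      = [(pvKeyU records).map some] ++ records.map (fun rec => (pvKeyU records).map (fun k => pvCell rec k)) := by
    rw [← pv_foldl_flatMap d.items (fun kd => kd.2)
          (fun conv rec =>
            conv ++ [(pvKeyU records).foldl (fun row k =>
              row ++ [if rec.contains k then some (PySem.Int.toStr (rec.getD k 0)) else none]) []])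
          [(pvKeyU records).map some]]
    rw [PySem.List.foldl_append_singleton_eq_map]
    refine congrArg _ (List.map_congr_left (fun rec _ => ?_))
    rw [PySem.List.foldl_append_singleton_eq_map]
    simp [pvCell]
  -- ===== B-side: run the single pass =====
  have hloop := pv_loop records [] PySem.Dict.empty hrecnd pv_inv_nil
  simp only [List.nil_append, List.length_nil] at hloop
  set st := records.foldl (fun st rec =>
      (rec.items.foldl (fun cols kv =>
          cols.insert kv.1 (cols.getD kv.1 [] ++ List.replicate (st.2 - (cols.getD kv.1 []).length) none ++ [some (PySem.Int.toStr kv.2)]))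
        st.1, st.2 + 1)) (PySem.Dict.empty, 0) with hst
  obtain ⟨⟨hkeysB, hkndB, hcolB⟩, hn⟩ := hloop
  -- the padding pass: keys unchanged, every column padded to full length
  set colsP := st.1.items.foldl (fun c p => c.insert p.1 (p.2 ++ List.replicate (st.2 - p.2.length) none)) st.1 with hcolsP
  have hshapeP : (fun (c : PySem.Dict String (List (Option String))) (p : String × List (Option String)) =>
        c.insert p.1 (p.2 ++ List.replicate (st.2 - p.2.length) none))
      = fun c p => c.insert p.1 ((fun (p : String × List (Option String)) (_ : List (Option String)) =>
          p.2 ++ List.replicate (st.2 - p.2.length) none) p (c.getD p.1 [])) := rfl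
  have hfstP : st.1.items.map Prod.fst = st.1.keys := rfl
  have hkeysP : colsP.keys = st.1.keys := by
    rw [hcolsP, hshapeP, PySem.Dict.keys_foldl_insert_key, hfstP,
        PySem.Set.update_eq_append_filter]
    have hnil : (PySem.Set.ofList st.1.keys).filter (fun y => !(PySem.Set.contains st.1.keys y)) = [] := by
      rw [List.filter_eq_nil_iff]
      intro a ha
      have : a ∈ st.1.keys := (PySem.Set.mem_ofList _ _).1 ha
      simp [PySem.Set.contains_eq_listContains, this]
    rw [hnil, List.append_nil]
  have hcolP : ∀ k ∈ st.1.keys, colsP.getD k [] = records.map (fun r => pvCell r k) := by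
    intro k hk
    obtain ⟨p, hp, hp1⟩ := List.mem_map.1 (hfstP ▸ hk)
    have hexp : colsP.getD k [] = p.2 ++ List.replicate (st.2 - p.2.length) none := by
      have hhit := pv_ins_hit st.1.items
        (fun (p : String × List (Option String)) (_ : List (Option String)) =>
          p.2 ++ List.replicate (st.2 - p.2.length) none)
        st.1 (hfstP ▸ hkndB) p hp
      rw [hp1] at hhit
      rw [hcolsP, hshapeP]
      exact hhit
    have hp2 : st.1.getD k [] = p.2 := by
      have hm : (k, p.2) ∈ st.1.items := by
        have : p = (k, p.2) := by cases p; cases hp1; rfl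
        exact this ▸ hp
      exact PySem.Dict.getD_of_mem_items st.1 hm hkndB []
    rw [hexp, ← hp2, hn]
    have hpad := (hcolB k).2
    rw [← hpad]
  -- ===== assemble =====
  rw [hKA, hA, pv_foldl_join, hvals, ← hst, ← hcolsP, hkeysP, hkeysB, hn]
  refine congrArg _ ?_
  apply List.ext_getElem
  · simp
  · intro i h1 h2
    simp only [List.getElem_map, List.getElem_range]
    refine List.map_congr_left (fun k hk => ?_)
    have hk' : k ∈ st.1.keys := by rw [hkeysB]; exact hk
    rw [hcolP k hk', List.getElem?_map, List.getElem?_eq_getElem (by simpa using h2)]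
    rfl
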